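-- pv_equiv track=rewrite | github.com/qbxlvnf11/MultiWOZ2.1-parser | util.py | get_train_valid_test_data
-- ===== SOURCE A (Python) =====
-- def get_train_valid_test_data(data_json, train_id_list, valid_id_list, test_id_list):
-- 	train_data = []
-- 	train_key = []
-- 	valid_data = []
-- 	valid_key = []
-- 	test_data = []
-- 	test_key = []
--
-- 	for k, v in data_json.items():
-- 		if k in train_id_list:
-- 			train_key.append(k)
-- 			train_data.append(v)
--
-- 		if k in valid_id_list:
-- 			valid_key.append(k)
-- 			valid_data.append(v)
--
-- 		if k in test_id_list:
-- 			test_key.append(k)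
-- 			test_data.append(v)
--
-- 	return train_data, train_key, valid_data, valid_key, test_data, test_key
-- ===== SOURCE B (Python) =====
-- def _select(data_json, id_list):
--     items = list(data_json.items())
--     data = [v for k, v in items if k in id_list]
--     keys = [k for k, v in items if k in id_list]
--     return data, keys
--
-- def get_train_valid_test_data(data_json, train_id_list, valid_id_list, test_id_list):
--     train_data, train_key = _select(data_json, train_id_list)
--     valid_data, valid_key = _select(data_json, valid_id_list)
--     test_data, test_key = _select(data_json, test_id_list)
--     return train_data, train_key, valid_data, valid_key, test_data, test_key
-- ===== Notes on version B (the rewrite author's own statement) =====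
-- stated objective: simpler
-- what changed: Replaces the single fused loop with six accumulators by a helper that filters data_json once per id list (three independent comprehension passes), returning each data/key pair directly.
import Mathlib
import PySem

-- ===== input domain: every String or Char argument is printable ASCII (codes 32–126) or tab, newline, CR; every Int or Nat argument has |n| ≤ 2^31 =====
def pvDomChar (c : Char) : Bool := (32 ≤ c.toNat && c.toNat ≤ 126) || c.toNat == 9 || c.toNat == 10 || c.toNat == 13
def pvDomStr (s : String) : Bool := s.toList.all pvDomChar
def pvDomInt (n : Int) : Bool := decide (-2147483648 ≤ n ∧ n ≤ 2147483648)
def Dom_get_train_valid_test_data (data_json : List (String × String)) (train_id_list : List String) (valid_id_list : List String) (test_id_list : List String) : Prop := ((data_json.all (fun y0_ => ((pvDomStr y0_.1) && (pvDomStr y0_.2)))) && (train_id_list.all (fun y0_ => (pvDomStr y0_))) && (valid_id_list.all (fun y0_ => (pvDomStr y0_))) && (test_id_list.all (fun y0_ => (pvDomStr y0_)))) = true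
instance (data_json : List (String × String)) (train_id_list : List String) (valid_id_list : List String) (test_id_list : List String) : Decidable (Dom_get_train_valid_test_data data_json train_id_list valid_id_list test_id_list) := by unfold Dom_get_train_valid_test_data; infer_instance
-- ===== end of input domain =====

-- B replaces A's single fused six-accumulator loop by a per-id-list filtering helper called three times (objective: simpler).
-- ===== PORT A =====
def get_train_valid_test_data (data_json : List (String × String)) (train_id_list : List String) (valid_id_list : List String) (test_id_list : List String) : List String × List String × List String × List String × List String × List String :=
  -- one fused pass over data_json.items() carrying six accumulators, as in A
  let st := data_json.foldl
    (fun (acc : List String × List String × List String × List String × List String × List String) kv =>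
      let (td, tk, vd, vk, sd, sk) := acc
      let (td, tk) := if train_id_list.contains kv.1 then (td ++ [kv.2], tk ++ [kv.1]) else (td, tk)
      let (vd, vk) := if valid_id_list.contains kv.1 then (vd ++ [kv.2], vk ++ [kv.1]) else (vd, vk)
      let (sd, sk) := if test_id_list.contains kv.1 then (sd ++ [kv.2], sk ++ [kv.1]) else (sd, sk)
      (td, tk, vd, vk, sd, sk))
    ([], [], [], [], [], [])
  st

-- ===== PORT B =====
-- helper: one filtering pass per id list, returning (data, keys)
def pvSelect (data_json : List (String × String)) (id_list : List String) : List String × List String :=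
  let hits := data_json.filter (fun kv => id_list.contains kv.1)
  (hits.map Prod.snd, hits.map Prod.fst)

def get_train_valid_test_data_alt (data_json : List (String × String)) (train_id_list : List String) (valid_id_list : List String) (test_id_list : List String) : List String × List String × List String × List String × List String × List String :=
  let (td, tk) := pvSelect data_json train_id_list
  let (vd, vk) := pvSelect data_json valid_id_list
  let (sd, sk) := pvSelect data_json test_id_list
  (td, tk, vd, vk, sd, sk)

-- ===== PRECONDITION & SPEC =====
def Spec_get_train_valid_test_data (data_json : List (String × String)) (train_id_list : List String) (valid_id_list : List String) (test_id_list : List String) (out : List String × List String × List String × List String × List String × List String) : Prop := out = get_train_valid_test_data_alt data_json train_id_list valid_id_list test_id_list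
instance (data_json : List (String × String)) (train_id_list : List String) (valid_id_list : List String) (test_id_list : List String) (out : List String × List String × List String × List String × List String × List String) : Decidable (Spec_get_train_valid_test_data data_json train_id_list valid_id_list test_id_list out) := by unfold Spec_get_train_valid_test_data; infer_instance

-- ===== CLAIM (what is proved, stated in full; the proofs are below) =====
def Claim_equal_get_train_valid_test_data : Prop := ∀ (data_json : List (String × String)) (train_id_list : List String) (valid_id_list : List String) (test_id_list : List String), Dom_get_train_valid_test_data data_json train_id_list valid_id_list test_id_list → Spec_get_train_valid_test_data data_json train_id_list valid_id_list test_id_list (get_train_valid_test_data data_json train_id_list valid_id_list test_id_list)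

-- ===== LEMMAS AND PROOFS =====

-- ===== VERDICT (by name: the statement is the Claim_ definition above) =====
-- the fused fold, started from arbitrary accumulators, appends exactly the three filtered selections
theorem pv_fold_char (tr va te : List String) (dj : List (String × String))
    (td tk vd vk sd sk : List String) :
    dj.foldl
      (fun (acc : List String × List String × List String × List String × List String × List String) kv =>
        let (td, tk, vd, vk, sd, sk) := acc
        let (td, tk) := if tr.contains kv.1 then (td ++ [kv.2], tk ++ [kv.1]) else (td, tk)
        let (vd, vk) := if va.contains kv.1 then (vd ++ [kv.2], vk ++ [kv.1]) else (vd, vk)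
        let (sd, sk) := if te.contains kv.1 then (sd ++ [kv.2], sk ++ [kv.1]) else (sd, sk)
        (td, tk, vd, vk, sd, sk))
      (td, tk, vd, vk, sd, sk)
    = (td ++ (pvSelect dj tr).1, tk ++ (pvSelect dj tr).2,
       vd ++ (pvSelect dj va).1, vk ++ (pvSelect dj va).2,
       sd ++ (pvSelect dj te).1, sk ++ (pvSelect dj te).2) := by
  induction dj generalizing td tk vd vk sd sk with
  | nil => simp [pvSelect]
  | cons kv rest ih =>
    simp only [List.foldl_cons]
    rw [ih]
    simp [pvSelect, List.filter_cons]
    split_ifs <;> simp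

theorem get_train_valid_test_data_spec : Claim_equal_get_train_valid_test_data := by
  intro dj tr va te _
  show _ = _
  unfold get_train_valid_test_data get_train_valid_test_data_alt
  rw [pv_fold_char]
  simp
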